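-- pv_equiv track=rewrite | github.com/coding-samu/Algo2 | greedyMethods.py | scelta
-- ===== SOURCE A (Python) =====
-- def scelta(A, B):
--     """
--     Calculates the sum of elements from two lists based on a greedy method.
--
--     The function takes two lists, A and B, of equal length as input. It calculates the difference
--     between each element of A and B, sorts the differences in descending order, and then selects
--     the first half of the sorted list from A and the second half from B. Finally, it returns the
--     sum of the selected elements.
--
--     Args:
--         A (list): The first list of elements.
--         B (list): The second list of elements.
--
--     Returns:
--         int: The sum of the selected elements.
--
--     """
--     n = len(A)
--     lista = [(A[i]-B[i],i) for i in range(n)]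
--     lista.sort(reverse=True)
--     sol = 0
--     for i in range(n//2):
--         sol += A[lista[i][1]]
--     for i in range(n//2,n):
--         sol += B[lista[i][1]]
--     return sol
-- ===== SOURCE B (Python) =====
-- def scelta(A, B):
--     # Quickselect-style recursion: the greedy total equals sum(B) plus the sum of
--     # the n//2 largest differences A[i]-B[i]; top_sum finds that sum by three-way
--     # partitioning around a middle pivot instead of sorting.
--     def top_sum(xs, k):
--         # sum of the k largest elements of xs (0 <= k <= len(xs))
--         if k <= 0:
--             return 0
--         p = xs[len(xs) // 2]
--         g = [x for x in xs if x > p]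
--         l = [x for x in xs if x < p]
--         e = len(xs) - len(g) - len(l)   # multiplicity of the pivot
--         if k <= len(g):
--             return top_sum(g, k)
--         if k <= len(g) + e:
--             return sum(g) + p * (k - len(g))
--         return sum(g) + p * e + top_sum(l, k - len(g) - e)
--     n = len(A)
--     diffs = [a - b for a, b in zip(A, B)]
--     return sum(B[:n]) + top_sum(diffs, n // 2)
-- ===== Notes on version B (the rewrite author's own statement) =====
-- stated objective: alternative
-- what changed: A sorts (diff,index) pairs and indexes back into A and B; B never sorts: it uses sol = sum(B) + sum of the n//2 largest differences and computes that sum by a quickselect-style three-way partition recursion around a middle pivot.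
import Mathlib
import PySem

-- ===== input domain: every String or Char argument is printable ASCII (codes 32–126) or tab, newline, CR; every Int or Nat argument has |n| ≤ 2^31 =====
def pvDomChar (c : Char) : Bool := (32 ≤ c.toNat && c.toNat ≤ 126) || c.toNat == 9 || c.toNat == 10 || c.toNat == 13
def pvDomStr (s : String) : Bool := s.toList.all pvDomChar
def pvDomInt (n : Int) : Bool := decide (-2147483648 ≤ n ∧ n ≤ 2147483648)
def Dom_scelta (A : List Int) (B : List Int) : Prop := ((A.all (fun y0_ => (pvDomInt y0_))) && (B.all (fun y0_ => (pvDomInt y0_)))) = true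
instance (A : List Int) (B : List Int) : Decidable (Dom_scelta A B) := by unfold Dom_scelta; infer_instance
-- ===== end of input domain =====

-- B avoids A's sort of (diff, index) pairs: it computes sum(B) plus the sum of the
-- n//2 largest differences by a quickselect-style three-way partition recursion.

-- ===== PORT A =====
def scelta (A : List Int) (B : List Int) : Int :=
  let n : Int := A.length
  let lista : List (Int × Int) :=
    (PySem.List.pyRange 0 n 1).map
      (fun i => (PySem.List.pyGetD A i 0 - PySem.List.pyGetD B i 0, i))
  let lista := PySem.List.sorted2 lista (fun p => p.1) (fun p => p.2) true
  let sol : Int := 0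
  let sol := (PySem.List.pyRange 0 (PySem.Int.floordiv n 2) 1).foldl
    (fun sol i => sol + PySem.List.pyGetD A (PySem.List.pyGetD lista i (0, 0)).2 0) sol
  let sol := (PySem.List.pyRange (PySem.Int.floordiv n 2) n 1).foldl
    (fun sol i => sol + PySem.List.pyGetD B (PySem.List.pyGetD lista i (0, 0)).2 0) sol
  sol

-- ===== PORT B =====
-- top_sum from Source B: sum of the k largest elements by three-way partition around
-- the middle element.  The '[] => 0' arm only guards totality: Python raises
-- IndexError at xs[len(xs)//2] there, and that call is unreachable when k ≤ len(xs).
def topSum : List Int → Int → Int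
  | [], _ => 0
  | q :: t, k =>
    if k ≤ 0 then 0
    else
      let p := (q :: t)[(q :: t).length / 2]'(Nat.div_lt_self (by simp) one_lt_two)
      let g := (q :: t).filter (fun x => decide (p < x))
      let l := (q :: t).filter (fun x => decide (x < p))
      let e : Int := ((q :: t).length : Int) - g.length - l.length
      if k ≤ (g.length : Int) then topSum g k
      else if k ≤ (g.length : Int) + e then g.sum + p * (k - (g.length : Int))
      else g.sum + p * e + topSum l (k - (g.length : Int) - e)
termination_by xs _ => xs.length
decreasing_by
  · exact Nat.lt_of_le_of_ne (List.length_filter_le _ _) (fun h => by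
      have := (List.length_filter_eq_length_iff.mp h) _
        (List.getElem_mem (Nat.div_lt_self (by simp) one_lt_two))
      simp at this)
  · exact Nat.lt_of_le_of_ne (List.length_filter_le _ _) (fun h => by
      have := (List.length_filter_eq_length_iff.mp h) _
        (List.getElem_mem (Nat.div_lt_self (by simp) one_lt_two))
      simp at this)

def scelta_alt (A : List Int) (B : List Int) : Int :=
  let n : Int := A.length
  let diffs := (A.zip B).map (fun p => p.1 - p.2)
  (PySem.List.slice B none (some n)).sum + topSum diffs (PySem.Int.floordiv n 2)

-- ===== PRECONDITION & SPEC =====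
-- A evaluates B[i] for every i < len(A): it raises IndexError exactly when len(B) < len(A).
def Pre_scelta (A : List Int) (B : List Int) : Prop := A.length ≤ B.length
instance (A : List Int) (B : List Int) : Decidable (Pre_scelta A B) := by unfold Pre_scelta; infer_instance
def pvWitness_scelta : List Int × List Int := ([3, 1, 4], [2, 7, 1])

def Spec_scelta (A : List Int) (B : List Int) (out : Int) : Prop := out = scelta_alt A B
instance (A : List Int) (B : List Int) (out : Int) : Decidable (Spec_scelta A B out) := by unfold Spec_scelta; infer_instance

-- ===== CLAIM (what is proved, stated in full; the proofs are below) =====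
def Claim_equal_scelta : Prop := ∀ (A : List Int) (B : List Int), Dom_scelta A B → Pre_scelta A B → Spec_scelta A B (scelta A B)

-- ===== LEMMAS AND PROOFS =====

-- any ≥-pairwise rearrangement of xs IS sorted(xs, reverse=True)
theorem pv_sortedRev_eq (xs ys : List Int) (hp : ys.Perm xs)
    (hpw : ys.Pairwise (fun a b => b ≤ a)) :
    PySem.List.sorted xs (fun x => x) true = ys := by
  have h1 : (PySem.List.sorted xs (fun x => x) true).Perm ys :=
    (PySem.List.sorted_perm ..).trans hp.symm
  exact List.Perm.eq_of_pairwise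
    (fun a b _ _ hab hba => le_antisymm hba hab)
    (PySem.List.sorted_pairwise_rev ..) hpw h1

-- sorted-descending splits at a pivot into the strictly-greater part, the pivot
-- block, and the strictly-smaller part
theorem pv_sortedRev_decomp (xs : List Int) (p : Int) :
    PySem.List.sorted xs (fun x => x) true =
      PySem.List.sorted (xs.filter (fun x => decide (p < x))) (fun x => x) true
      ++ (List.replicate (xs.count p) p
      ++ PySem.List.sorted (xs.filter (fun x => decide (x < p))) (fun x => x) true) := by
  set Sg := PySem.List.sorted (xs.filter (fun x => decide (p < x))) (fun x => x) true with hSg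
  set Sl := PySem.List.sorted (xs.filter (fun x => decide (x < p))) (fun x => x) true with hSl
  have hmemg : ∀ x ∈ Sg, p < x := by
    intro x hx
    have := (PySem.List.mem_sorted ..).mp hx
    simpa using (List.mem_filter.mp this).2
  have hmeml : ∀ x ∈ Sl, x < p := by
    intro x hx
    have := (PySem.List.mem_sorted ..).mp hx
    simpa using (List.mem_filter.mp this).2
  apply pv_sortedRev_eq
  · -- permutation, via counts
    rw [List.perm_iff_count]
    intro a
    have hg : Sg.count a = (xs.filter (fun x => decide (p < x))).count a :=
      ((PySem.List.sorted_perm ..)).count_eq a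
    have hl : Sl.count a = (xs.filter (fun x => decide (x < p))).count a :=
      ((PySem.List.sorted_perm ..)).count_eq a
    simp only [List.count_append, hg, hl, List.count_replicate]
    rcases lt_trichotomy a p with h | h | h
    · have h1 : (List.filter (fun x => decide (p < x)) xs).count a = 0 :=
        List.count_eq_zero_of_not_mem (fun hm => by
          have := (List.mem_filter.mp hm).2; simp at this; omega)
      have h2 : (List.filter (fun x => decide (x < p)) xs).count a = xs.count a :=
        List.count_filter (by simpa using h)
      have h3 : (p == a) = false := by simp; omega
      rw [h1, h2, h3]; simp
    · subst h
      have h1 : (List.filter (fun x => decide (a < x)) xs).count a = 0 :=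
        List.count_eq_zero_of_not_mem (fun hm => by
          have := (List.mem_filter.mp hm).2; simp at this)
      have h2 : (List.filter (fun x => decide (x < a)) xs).count a = 0 :=
        List.count_eq_zero_of_not_mem (fun hm => by
          have := (List.mem_filter.mp hm).2; simp at this)
      rw [h1, h2]; simp
    · have h1 : (List.filter (fun x => decide (p < x)) xs).count a = xs.count a :=
        List.count_filter (by simpa using h)
      have h2 : (List.filter (fun x => decide (x < p)) xs).count a = 0 :=
        List.count_eq_zero_of_not_mem (fun hm => by
          have := (List.mem_filter.mp hm).2; simp at this; omega)
      have h3 : (p == a) = false := by simp; omega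
      rw [h1, h2, h3]; simp
  · -- pairwise descending
    rw [List.pairwise_append]
    refine ⟨?_, ?_, ?_⟩
    · exact PySem.List.sorted_pairwise_rev (xs.filter (fun x => decide (p < x))) (fun x => x)
    · rw [List.pairwise_append]
      refine ⟨List.pairwise_replicate.mpr (Or.inr le_rfl),
        PySem.List.sorted_pairwise_rev (xs.filter (fun x => decide (x < p))) (fun x => x), ?_⟩
      intro a ha b hb
      have ha' := List.eq_of_mem_replicate ha
      have hb' := hmeml b hb
      omega
    · intro a ha b hb
      have ha' := hmemg a ha
      rcases List.mem_append.mp hb with hb | hb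
      · have := List.eq_of_mem_replicate hb; omega
      · have := hmeml b hb; omega

-- lengths add up across the three-way partition
theorem pv_partition_length (xs : List Int) (p : Int) :
    xs.length = (xs.filter (fun x => decide (p < x))).length
      + xs.count p + (xs.filter (fun x => decide (x < p))).length := by
  have h := congrArg List.length (pv_sortedRev_decomp xs p)
  simp [PySem.List.length_sorted] at h
  omega

-- topSum xs k = sum of the first k elements of xs sorted descending
theorem topSum_eq (n : Nat) : ∀ (xs : List Int) (k : Int), xs.length = n →
    0 ≤ k → k ≤ (xs.length : Int) →
    topSum xs k = ((PySem.List.sorted xs (fun x => x) true).take k.toNat).sum := by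
  induction n using Nat.strong_induction_on with
  | _ n ih =>
    intro xs k hn hk0 hk
    match xs, hn with
    | [], hn =>
      rw [topSum.eq_1]
      rw [(PySem.List.sorted_eq_nil_iff ([] : List Int) (fun x => x) true).mpr rfl]
      simp
    | q :: t, hn =>
      by_cases hk0' : k ≤ 0
      · have : k = 0 := le_antisymm hk0' hk0
        subst this
        rw [topSum.eq_2, if_pos le_rfl]
        simp
      · rw [topSum.eq_2, if_neg hk0']
        simp only []
        set xs := q :: t with hxs
        set p := xs[xs.length / 2]'(Nat.div_lt_self (by simp [hxs]) one_lt_two) with hp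
        have hpmem : p ∈ xs := List.getElem_mem _
        set g := xs.filter (fun x => decide (p < x)) with hg
        set l := xs.filter (fun x => decide (x < p)) with hl
        set c := xs.count p with hc
        have hlen : xs.length = g.length + c + l.length := pv_partition_length xs p
        have hc1 : 1 ≤ c := List.count_pos_iff.mpr hpmem
        have hdecomp := pv_sortedRev_decomp xs p
        rw [← hg, ← hl, ← hc] at hdecomp
        set Sg := PySem.List.sorted g (fun x => x) true with hSg
        set Sl := PySem.List.sorted l (fun x => x) true with hSl
        have hSglen : Sg.length = g.length := PySem.List.length_sorted ..
        have hSllen : Sl.length = l.length := PySem.List.length_sorted ..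
        have hgsum : Sg.sum = g.sum := (PySem.List.sorted_perm ..).sum_eq
        rw [hdecomp]
        by_cases h1 : k ≤ (g.length : Int)
        · rw [if_pos h1]
          have hglt : g.length < n := by omega
          have := ih g.length hglt g k rfl hk0 h1
          rw [this, List.take_append_of_le_length (by
            rw [hSglen]; omega)]
        · rw [if_neg h1]
          have he : ((xs.length : Int) - g.length - l.length) = (c : Int) := by
            rw [hlen]; push_cast; ring
          rw [he]
          by_cases h2 : k ≤ (g.length : Int) + (c : Int)
          · rw [if_pos h2]
            have hm : k.toNat - Sg.length ≤ c := by omega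
            rw [List.take_append,
              List.take_of_length_le (by omega),
              List.take_append, List.take_replicate,
              List.sum_append, List.sum_append, hgsum]
            have : k.toNat - Sg.length - (List.replicate c p).length = 0 := by
              simp [List.length_replicate]; omega
            rw [this]
            simp only [List.take_zero, List.sum_nil, add_zero,
              min_eq_left hm, List.sum_replicate, nsmul_eq_mul]
            have : ((k.toNat - Sg.length : Nat) : Int) = k - (g.length : Int) := by
              omega
            rw [this]; ring
          · rw [if_neg h2]
            have hllt : l.length < n := by omega
            have hk' : k - (g.length : Int) - (c : Int) ≤ (l.length : Int) := by
              omega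
            have := ih l.length hllt l (k - (g.length : Int) - (c : Int)) rfl
              (by omega) hk'
            rw [List.take_append,
              List.take_of_length_le (by omega),
              List.take_append, List.take_of_length_le (by
                simp [List.length_replicate]; omega),
              List.sum_append, List.sum_append, hgsum, this,
              List.sum_replicate, nsmul_eq_mul]
            have : k.toNat - Sg.length - (List.replicate c p).length
                = (k - (g.length : Int) - (c : Int)).toNat := by
              simp [List.length_replicate]; omega
            rw [this]; ring

-- insertBy with an asymmetric, transitive Boolean relation keeps the list
-- pairwise-ordered by the negation of the relation (specific to A's sorted2 call;
-- PySem states no pairwise lemma for sorted2).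
theorem pv_insertBy_pairwise {α : Type} (be : α → α → Bool)
    (hasym : ∀ a b, be a b = true → be b a = false)
    (htrans : ∀ a b c, be a b = true → be b c = true → be a c = true)
    (x : α) (acc : List α) (hacc : acc.Pairwise (fun a b => be b a = false)) :
    (PySem.List.insertBy be x acc).Pairwise (fun a b => be b a = false) := by
  induction acc with
  | nil => simp [PySem.List.insertBy]
  | cons y ys ih =>
    rcases List.pairwise_cons.mp hacc with ⟨hy, hys⟩
    by_cases hxy : be x y = true
    · simp only [PySem.List.insertBy, hxy, if_true]
      refine List.Pairwise.cons ?_ (List.Pairwise.cons hy hys)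
      intro z hz
      rcases List.mem_cons.mp hz with rfl | hz
      · exact hasym _ _ hxy
      · by_cases hzx : be z x = true
        · have := htrans _ _ _ hzx hxy
          rw [hy z hz] at this; exact absurd this (by simp)
        · simpa using hzx
    · simp only [PySem.List.insertBy, hxy]
      refine List.Pairwise.cons ?_ (ih hys)
      intro w hw
      rcases (PySem.List.mem_insertBy be x w ys).mp hw with rfl | hw
      · simpa using hxy
      · exact hy w hw
theorem pv_foldl_insertBy_pairwise {α : Type} (be : α → α → Bool)
    (hasym : ∀ a b, be a b = true → be b a = false)
    (htrans : ∀ a b c, be a b = true → be b c = true → be a c = true)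
    (xs acc : List α) (hacc : acc.Pairwise (fun a b => be b a = false)) :
    (xs.foldl (fun acc x => PySem.List.insertBy be x acc) acc).Pairwise
      (fun a b => be b a = false) := by
  induction xs generalizing acc with
  | nil => simpa using hacc
  | cons x xs ih =>
    exact ih _ (pv_insertBy_pairwise be hasym htrans x acc hacc)

-- first components of A's reverse lex-sorted pair list are nonincreasing
theorem pv_sorted2_fst_pairwise (xs : List (Int × Int)) :
    (PySem.List.sorted2 xs (fun p => p.1) (fun p => p.2) true).Pairwise
      (fun a b => b.1 ≤ a.1) := by
  have h := pv_foldl_insertBy_pairwise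
    (fun a b : Int × Int =>
      decide (b.1 < a.1) || (!decide (a.1 < b.1) && decide (b.2 < a.2)))
    (by intro a b h; revert h; simp; omega)
    (by intro a b c h1 h2; revert h1 h2; simp; omega)
    xs [] (by simp)
  refine List.Pairwise.imp ?_ h
  intro a b hab
  revert hab; simp; omega

theorem scelta_spec_aux (A B : List Int) (hpre : A.length ≤ B.length) :
    scelta A B = scelta_alt A B := by
  simp only [scelta, scelta_alt]
  set n : Int := (A.length : Int) with hn
  set nn : Nat := A.length with hnn
  set kk : Nat := A.length / 2 with hkk
  have hfd : PySem.Int.floordiv n 2 = (kk : Int) := by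
    rw [hn, hkk]; exact_mod_cast PySem.Int.floordiv_natCast A.length 2
  set lista : List (Int × Int) :=
    (PySem.List.pyRange 0 n 1).map
      (fun i => (PySem.List.pyGetD A i 0 - PySem.List.pyGetD B i 0, i)) with hlista
  set L := PySem.List.sorted2 lista (fun p => p.1) (fun p => p.2) true with hL
  have hperm : L.Perm lista := PySem.List.sorted2_perm ..
  have hlen_lista : lista.length = nn := by
    simp [hlista, PySem.List.length_pyRange_one]
    omega
  have hlenL : L.length = nn := hperm.length_eq.trans hlen_lista
  have hkle : kk ≤ nn := Nat.div_le_self _ _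
  -- the two index loops are sums over L.take kk and L.drop kk
  have hmapfull : (PySem.List.pyRange 0 n 1).map (fun i => PySem.List.pyGetD L i ((0:Int),(0:Int))) = L := by
    have := PySem.List.map_pyGetD_pyRange_zero' L ((0:Int),(0:Int))
    rw [hn, ← hlenL]; exact_mod_cast this
  have hsplit : PySem.List.pyRange 0 n 1 =
      PySem.List.pyRange 0 (kk : Int) 1 ++ PySem.List.pyRange (kk : Int) n 1 :=
    PySem.List.pyRange_one_append 0 (kk : Int) n (by positivity) (by rw [hn]; exact_mod_cast hkle)
  have hdrop : (PySem.List.pyRange (kk : Int) n 1).map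
      (fun i => PySem.List.pyGetD L i ((0:Int),(0:Int))) = L.drop kk := by
    have := PySem.List.map_pyGetD_pyRange' L ((0:Int),(0:Int)) (a := (kk : Int)) (by positivity)
    rw [hn, ← hlenL]
    simpa using this
  have htake : (PySem.List.pyRange 0 (kk : Int) 1).map
      (fun i => PySem.List.pyGetD L i ((0:Int),(0:Int))) = L.take kk := by
    have h2 : (PySem.List.pyRange 0 (kk:Int) 1).map (fun i => PySem.List.pyGetD L i ((0:Int),(0:Int)))
        ++ L.drop kk = L.take kk ++ L.drop kk := by
      calc (PySem.List.pyRange 0 (kk:Int) 1).map (fun i => PySem.List.pyGetD L i ((0:Int),(0:Int)))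
            ++ L.drop kk
          = (PySem.List.pyRange 0 n 1).map (fun i => PySem.List.pyGetD L i ((0:Int),(0:Int))) := by
            rw [hsplit, List.map_append, hdrop]
        _ = L := hmapfull
        _ = L.take kk ++ L.drop kk := (List.take_append_drop kk L).symm
    have hlen2 : ((PySem.List.pyRange 0 (kk:Int) 1).map
        (fun i => PySem.List.pyGetD L i ((0:Int),(0:Int)))).length = (L.take kk).length := by
      simp [PySem.List.length_pyRange_one, hlenL, hkle]
    exact List.append_inj_left h2 hlen2
  -- elements of lista: fst determines the A-lookup
  have helem : ∀ p ∈ lista, PySem.List.pyGetD A p.2 0 = p.1 + PySem.List.pyGetD B p.2 0 := by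
    intro p hp
    rw [hlista] at hp
    rcases List.mem_map.mp hp with ⟨i, _, rfl⟩
    ring
  have helemL : ∀ p ∈ L.take kk, PySem.List.pyGetD A p.2 0 = p.1 + PySem.List.pyGetD B p.2 0 :=
    fun p hp => helem p (hperm.mem_iff.mp (List.mem_of_mem_take hp))
  -- rewrite the two loops
  rw [PySem.List.foldl_add, PySem.List.foldl_add, hfd]
  have hcomp1 : (PySem.List.pyRange 0 (kk : Int) 1).map
      (fun i => PySem.List.pyGetD A (PySem.List.pyGetD L i ((0:Int),(0:Int))).2 0)
      = (L.take kk).map (fun p => PySem.List.pyGetD A p.2 0) := by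
    rw [← htake, List.map_map]; rfl
  have hcomp2 : (PySem.List.pyRange (kk : Int) n 1).map
      (fun i => PySem.List.pyGetD B (PySem.List.pyGetD L i ((0:Int),(0:Int))).2 0)
      = (L.drop kk).map (fun p => PySem.List.pyGetD B p.2 0) := by
    rw [← hdrop, List.map_map]; rfl
  rw [hcomp1, hcomp2]
  have hsum1 : ((L.take kk).map (fun p => PySem.List.pyGetD A p.2 0)).sum
      = ((L.take kk).map (fun p => p.1)).sum
        + ((L.take kk).map (fun p => PySem.List.pyGetD B p.2 0)).sum := by
    rw [List.map_congr_left helemL]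
    exact PySem.List.sum_map_add_int ..
  rw [hsum1]
  -- B-lookups over all of L sum to sum(B[:n])
  have hBsum : ((L.take kk).map (fun p => PySem.List.pyGetD B p.2 0)).sum
      + ((L.drop kk).map (fun p => PySem.List.pyGetD B p.2 0)).sum
      = (B.take nn).sum := by
    rw [← List.sum_append, ← List.map_append, List.take_append_drop]
    have hp2 : (L.map (fun p => PySem.List.pyGetD B p.2 0)).Perm
        (lista.map (fun p => PySem.List.pyGetD B p.2 0)) := hperm.map _
    rw [hp2.sum_eq, hlista, List.map_map]
    have hfullB : (PySem.List.pyRange 0 (B.length : Int) 1).map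
        (fun i => PySem.List.pyGetD B i 0) = B := by
      have := PySem.List.map_pyGetD_pyRange_zero' B (0:Int)
      exact_mod_cast this
    have hsplitB : PySem.List.pyRange 0 (B.length : Int) 1 =
        PySem.List.pyRange 0 n 1 ++ PySem.List.pyRange n (B.length : Int) 1 :=
      PySem.List.pyRange_one_append 0 n (B.length : Int) (by positivity)
        (by rw [hn]; exact_mod_cast hpre)
    have hdropB : (PySem.List.pyRange n (B.length : Int) 1).map
        (fun i => PySem.List.pyGetD B i 0) = B.drop nn := by
      have := PySem.List.map_pyGetD_pyRange' B (0:Int) (a := n) (by rw [hn]; positivity)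
      rw [hn] at this ⊢
      simpa using this
    have h2 : (PySem.List.pyRange 0 n 1).map (fun i => PySem.List.pyGetD B i 0)
        ++ B.drop nn = B.take nn ++ B.drop nn := by
      calc (PySem.List.pyRange 0 n 1).map (fun i => PySem.List.pyGetD B i 0) ++ B.drop nn
          = (PySem.List.pyRange 0 (B.length : Int) 1).map (fun i => PySem.List.pyGetD B i 0) := by
            rw [hsplitB, List.map_append, hdropB]
        _ = B := hfullB
        _ = B.take nn ++ B.drop nn := (List.take_append_drop nn B).symm
    have hlen2 : ((PySem.List.pyRange 0 n 1).map (fun i => PySem.List.pyGetD B i 0)).length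
        = (B.take nn).length := by
      simp [PySem.List.length_pyRange_one, hn, hnn]
      omega
    have h3 := List.append_inj_left h2 hlen2
    calc (List.map ((fun p => PySem.List.pyGetD B p.2 0) ∘
            fun i => (PySem.List.pyGetD A i 0 - PySem.List.pyGetD B i 0, i))
            (PySem.List.pyRange 0 n 1)).sum
        = ((PySem.List.pyRange 0 n 1).map (fun i => PySem.List.pyGetD B i 0)).sum := rfl
      _ = (B.take nn).sum := by rw [h3]
  -- the taken firsts are the top-kk of the sorted plain diffs
  have hzip : (A.zip B).map (fun p => p.1 - p.2) = lista.map (fun p => p.1) := by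
    rw [hlista, List.map_map]
    apply List.ext_getElem
    · simp [PySem.List.length_pyRange_one, hn]
      omega
    · intro i h1 h2
      simp only [List.getElem_map, List.getElem_zip, Function.comp_apply,
        PySem.List.getElem_pyRange_one, zero_add]
      have h1' := h1
      simp only [List.length_map, List.length_zip, lt_min_iff] at h1'
      have hiA : i < A.length := h1'.1
      have hiB : i < B.length := h1'.2
      rw [PySem.List.pyGetD_natCast, PySem.List.pyGetD_natCast,
        List.getD_eq_getElem _ _ hiA, List.getD_eq_getElem _ _ hiB]
  set diffs := (A.zip B).map (fun p => p.1 - p.2) with hdiffs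
  set Y := PySem.List.sorted diffs (fun x => x) true with hY
  have hdlen : diffs.length = nn := by
    simp [hdiffs, hnn]; omega
  have htop : topSum diffs ((kk : Nat) : Int) = (Y.take kk).sum := by
    have := topSum_eq diffs.length diffs ((kk : Nat) : Int) rfl (by positivity)
      (by rw [hdlen]; exact_mod_cast hkle)
    simpa [hY] using this
  have hfst : L.map (fun p => p.1) = Y := by
    have hpY : Y.Perm (lista.map (fun p => p.1)) := by
      rw [hY, hzip]
      exact PySem.List.sorted_perm (lista.map (fun p => p.1)) (fun x => x) true
    have hperm2 : (L.map (fun p => p.1)).Perm Y := (hperm.map _).trans hpY.symm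
    have hpw1 : (L.map (fun p => p.1)).Pairwise (fun a b : Int => b ≤ a) :=
      List.Pairwise.map _ (fun a b h => h) (pv_sorted2_fst_pairwise lista)
    have hpw2 : Y.Pairwise (fun a b : Int => b ≤ a) :=
      PySem.List.sorted_pairwise_rev diffs (fun x => x)
    exact hperm2.eq_of_pairwise (fun a b _ _ h1 h2 => le_antisymm h2 h1) hpw1 hpw2
  have hslice1 : PySem.List.slice B none (some n) = B.take nn := by
    rw [PySem.List.slice_to B (by positivity)]
    simp [hn, hnn]
  rw [hslice1, htop, ← hfst, ← List.map_take]
  ring_nf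
  omega

-- ===== VERDICT (by name: the statement is the Claim_ definition above) =====
theorem scelta_spec : Claim_equal_scelta := by
  intro A B _ hpre
  unfold Spec_scelta
  exact scelta_spec_aux A B hpre
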